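-- pv_equiv track=rewrite | github.com/MrBrantCode/unitest_baseline | mut_generate/mist_train_cf/cf_65667/solution.py | merge_de_dupe_and_count_pairs
-- ===== SOURCE A (Python) =====
-- def merge_de_dupe_and_count_pairs(arr1, arr2, target):
--     # Merge arrays
--     merged = sorted(set(arr1 + arr2))
--
--     # Initialize two pointers at both ends
--     left, right = 0, len(merged) - 1
--     count = 0
--
--     while left < right:
--         curr_sum = merged[left] + merged[right]
--
--         # If current sum is less than target, increment left pointer
--         if curr_sum < target:
--             left += 1
--         # If current sum is more than target, decrement right pointer
--         elif curr_sum > target: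
--             right -= 1
--         # If current sum is equal to target, increment count and move both pointers
--         else:
--             count += 1
--             left += 1
--             right -= 1
--
--     return merged, count
-- ===== SOURCE B (Python) =====
-- def merge_de_dupe_and_count_pairs(arr1, arr2, target):
--     merged = sorted(set(arr1 + arr2))
--     s = set(merged)
--     count = sum(1 for x in merged if target - x in s and x < target - x)
--     return merged, count
-- ===== Notes on version B (the rewrite author's own statement) =====
-- stated objective: simpler
-- what changed: Replaces the two-pointer converging index scan with a one-line hash-membership count: for each x in merged, count it when target-x is in the set and x < target-x.
import Mathlib
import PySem

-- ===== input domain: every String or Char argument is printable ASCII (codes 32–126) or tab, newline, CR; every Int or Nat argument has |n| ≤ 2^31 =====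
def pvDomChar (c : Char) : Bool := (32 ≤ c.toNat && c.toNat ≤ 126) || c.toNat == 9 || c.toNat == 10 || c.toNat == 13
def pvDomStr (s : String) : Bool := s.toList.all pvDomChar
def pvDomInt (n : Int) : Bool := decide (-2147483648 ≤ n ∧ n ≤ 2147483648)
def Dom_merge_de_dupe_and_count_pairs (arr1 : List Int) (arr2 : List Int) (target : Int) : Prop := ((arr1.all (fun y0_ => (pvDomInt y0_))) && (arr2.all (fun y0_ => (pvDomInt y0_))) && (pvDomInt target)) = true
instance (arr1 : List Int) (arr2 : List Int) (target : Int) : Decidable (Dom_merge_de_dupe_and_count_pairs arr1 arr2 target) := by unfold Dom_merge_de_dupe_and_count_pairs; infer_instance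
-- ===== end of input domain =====

-- B replaces A's two-pointer converging scan with a hash-membership count over the merged list (objective: simpler).

-- ===== PORT A =====
-- The while-loop of A; merged[left]/merged[right] are ported with pyGetD (default 0),
-- which is exact here because the loop only reads indices with 0 ≤ left < right < len(merged).
def pvLoopA (l : List Int) (t : Int) (left right count : Int) : Int :=
  if h : left < right then
    let currSum := PySem.List.pyGetD l left 0 + PySem.List.pyGetD l right 0
    if currSum < t then pvLoopA l t (left + 1) right count
    else if currSum > t then pvLoopA l t left (right - 1) count
    else pvLoopA l t (left + 1) (right - 1) (count + 1)
  else count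
termination_by (right - left).toNat
decreasing_by all_goals omega

def merge_de_dupe_and_count_pairs (arr1 : List Int) (arr2 : List Int) (target : Int) : List Int × Int :=
  let merged := PySem.List.sorted (PySem.Set.ofList (arr1 ++ arr2)) (fun x => x) false
  (merged, pvLoopA merged target 0 ((merged.length : Int) - 1) 0)

-- ===== PORT B =====
def merge_de_dupe_and_count_pairs_alt (arr1 : List Int) (arr2 : List Int) (target : Int) : List Int × Int :=
  let merged := PySem.List.sorted (PySem.Set.ofList (arr1 ++ arr2)) (fun x => x) false
  let s : PySem.Set Int := PySem.Set.ofList merged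
  let count : Int := merged.foldl (fun c x => if (target - x) ∈ s ∧ x < target - x then c + 1 else c) 0
  (merged, count)

-- ===== PRECONDITION & SPEC =====
def Spec_merge_de_dupe_and_count_pairs (arr1 : List Int) (arr2 : List Int) (target : Int) (out : List Int × Int) : Prop := out = merge_de_dupe_and_count_pairs_alt arr1 arr2 target
instance (arr1 : List Int) (arr2 : List Int) (target : Int) (out : List Int × Int) : Decidable (Spec_merge_de_dupe_and_count_pairs arr1 arr2 target out) := by unfold Spec_merge_de_dupe_and_count_pairs; infer_instance

-- ===== CLAIM (what is proved, stated in full; the proofs are below) =====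
def Claim_equal_merge_de_dupe_and_count_pairs : Prop := ∀ (arr1 : List Int) (arr2 : List Int) (target : Int), Dom_merge_de_dupe_and_count_pairs arr1 arr2 target → Spec_merge_de_dupe_and_count_pairs arr1 arr2 target (merge_de_dupe_and_count_pairs arr1 arr2 target)

-- ===== LEMMAS AND PROOFS =====

-- the index segment [lo, hi] as a list of Ints
def pvSeg (lo hi : Int) : List Int := (List.range (hi + 1 - lo).toNat).map (fun (k : Nat) => lo + (k : Int))

-- element at index i of l
def pvg (l : List Int) (i : Int) : Int := PySem.List.pyGetD l i 0

-- "index i is counted by B's predicate, restricted to the segment [lo, hi]"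
def pvP (l : List Int) (t lo hi i : Int) : Bool :=
  decide ((t - pvg l i) ∈ (pvSeg lo hi).map (pvg l)) && decide (pvg l i < t - pvg l i)

def pvG (l : List Int) (t lo hi : Int) : Int :=
  ((pvSeg lo hi).countP (pvP l t lo hi) : Int)

lemma pvP_iff {l : List Int} {t lo hi i : Int} :
    pvP l t lo hi i = true ↔ (t - pvg l i) ∈ (pvSeg lo hi).map (pvg l) ∧ pvg l i < t - pvg l i := by
  simp [pvP]

lemma pvSeg_empty {lo hi : Int} (h : hi < lo) : pvSeg lo hi = [] := by
  unfold pvSeg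
  have : (hi + 1 - lo).toNat = 0 := by omega
  simp [this]

lemma pvSeg_cons {lo hi : Int} (h : lo ≤ hi) : pvSeg lo hi = lo :: pvSeg (lo + 1) hi := by
  unfold pvSeg
  have h1 : (hi + 1 - lo).toNat = (hi + 1 - (lo + 1)).toNat + 1 := by omega
  rw [h1, List.range_succ_eq_map, List.map_cons, List.map_map]
  refine List.cons_eq_cons.mpr ⟨by omega, ?_⟩
  apply List.map_congr_left
  intro k _
  simp only [Function.comp_apply]
  omega

lemma pvSeg_snoc {lo hi : Int} (h : lo ≤ hi) : pvSeg lo hi = pvSeg lo (hi - 1) ++ [hi] := by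
  unfold pvSeg
  have h1 : (hi + 1 - lo).toNat = (hi - 1 + 1 - lo).toNat + 1 := by omega
  rw [h1, List.range_succ, List.map_append, List.map_cons, List.map_nil]
  congr 2
  omega

lemma pvSeg_mem {lo hi i : Int} : i ∈ pvSeg lo hi ↔ lo ≤ i ∧ i ≤ hi := by
  unfold pvSeg
  simp only [List.mem_map]
  constructor
  · rintro ⟨k, hk, rfl⟩
    simp only [List.mem_range] at hk
    omega
  · rintro ⟨h1, h2⟩
    exact ⟨(i - lo).toNat, by simp only [List.mem_range]; omega, by omega⟩

lemma pvg_lt (l : List Int) (hp : l.Pairwise (· < ·)) {i j : Int} (h0 : 0 ≤ i) (hij : i < j)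
    (hj : j < (l.length : Int)) : pvg l i < pvg l j := by
  unfold pvg
  rw [PySem.List.pyGetD_eq_getElem l 0 h0 (by omega),
      PySem.List.pyGetD_eq_getElem l 0 (by omega) hj]
  exact List.pairwise_iff_getElem.mp hp i.toNat j.toNat (by omega) (by omega) (by omega)

lemma pvg_le (l : List Int) (hp : l.Pairwise (· < ·)) {i j : Int} (h0 : 0 ≤ i) (hij : i ≤ j)
    (hj : j < (l.length : Int)) : pvg l i ≤ pvg l j := by
  rcases eq_or_lt_of_le hij with rfl | h
  · exact le_refl _
  · exact le_of_lt (pvg_lt l hp h0 h hj)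

-- membership of a value in the image of a segment
lemma pv_mem_map_seg {l : List Int} {lo hi v : Int} :
    v ∈ (pvSeg lo hi).map (pvg l) ↔ ∃ j, lo ≤ j ∧ j ≤ hi ∧ pvg l j = v := by
  simp only [List.mem_map, pvSeg_mem]
  constructor
  · rintro ⟨j, ⟨h1, h2⟩, h3⟩; exact ⟨j, h1, h2, h3⟩
  · rintro ⟨j, h1, h2, h3⟩; exact ⟨j, ⟨h1, h2⟩, h3⟩

-- the main invariant of A's two-pointer loop
lemma pvLoop_eq (l : List Int) (t : Int) (hp : l.Pairwise (· < ·)) :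
    ∀ (k : Nat) (left right count : Int), (right - left).toNat = k → 0 ≤ left →
      right < (l.length : Int) →
      pvLoopA l t left right count = count + pvG l t left right := by
  intro k
  induction k using Nat.strong_induction_on with
  | _ k ih =>
    intro left right count hk h0 hr
    rw [pvLoopA]
    by_cases hlr : left < right
    · rw [dif_pos hlr]
      simp only
      have hlen : left < (l.length : Int) := by omega
      by_cases hlt : PySem.List.pyGetD l left 0 + PySem.List.pyGetD l right 0 < t
      · rw [if_pos hlt]
        have hlt' : pvg l left + pvg l right < t := hlt
        rw [ih (right - (left + 1)).toNat (by omega) (left + 1) right count rfl (by omega) hr]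
        congr 1
        unfold pvG
        rw [pvSeg_cons (lo := left) (hi := right) (le_of_lt hlr), List.countP_cons]
        have hnot : pvP l t left right left = false := by
          rw [Bool.eq_false_iff]
          intro hcon
          rcases pvP_iff.mp hcon with ⟨hmem, _⟩
          rcases pv_mem_map_seg.mp hmem with ⟨j, hj1, hj2, hj3⟩
          have : pvg l j ≤ pvg l right := pvg_le l hp (by omega) hj2 hr
          omega
        simp only [hnot, Bool.false_eq_true, if_false, add_zero]
        congr 1
        symm
        apply List.countP_congr
        intro i hi
        rcases pvSeg_mem.mp hi with ⟨hi1, hi2⟩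
        rw [pvP_iff, pvP_iff]
        rw [pvSeg_cons (lo := left) (hi := right) (le_of_lt hlr), List.map_cons, List.mem_cons]
        have hgi : pvg l left < pvg l i := pvg_lt l hp (by omega) (by omega) (by omega)
        constructor
        · rintro ⟨h1 | h1, h2⟩
          · omega
          · exact ⟨h1, h2⟩
        · rintro ⟨h1, h2⟩; exact ⟨Or.inr h1, h2⟩
      · rw [if_neg hlt]
        by_cases hgt : PySem.List.pyGetD l left 0 + PySem.List.pyGetD l right 0 > t
        · rw [if_pos hgt]
          have hgt' : pvg l left + pvg l right > t := hgt
          rw [ih (right - 1 - left).toNat (by omega) left (right - 1) count rfl h0 (by omega)]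
          congr 1
          unfold pvG
          rw [pvSeg_snoc (lo := left) (hi := right) (le_of_lt hlr), List.countP_append]
          have hnot : pvP l t left right right = false := by
            rw [Bool.eq_false_iff]
            intro hcon
            rcases pvP_iff.mp hcon with ⟨hmem, h2⟩
            rcases pv_mem_map_seg.mp hmem with ⟨j, hj1, hj2, hj3⟩
            have : pvg l left ≤ pvg l j := pvg_le l hp h0 hj1 (by omega)
            omega
          rw [List.countP_singleton]
          simp only [hnot, Bool.false_eq_true, if_false, add_zero]
          congr 1
          symm
          apply List.countP_congr
          intro i hi
          rcases pvSeg_mem.mp hi with ⟨hi1, hi2⟩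
          rw [pvP_iff, pvP_iff]
          rw [pvSeg_snoc (lo := left) (hi := right) (le_of_lt hlr), List.map_append, List.mem_append]
          have hgi : pvg l left ≤ pvg l i := pvg_le l hp h0 hi1 (by omega)
          constructor
          · rintro ⟨h1 | h1, h2⟩
            · exact ⟨h1, h2⟩
            · simp only [List.map_cons, List.map_nil, List.mem_singleton] at h1
              omega
          · rintro ⟨h1, h2⟩; exact ⟨Or.inl h1, h2⟩
        · rw [if_neg hgt]
          have heq : pvg l left + pvg l right = t := by
            have h1 : ¬ pvg l left + pvg l right < t := hlt
            have h2 : ¬ pvg l left + pvg l right > t := hgt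
            omega
          rw [ih (right - 1 - (left + 1)).toNat (by omega) (left + 1) (right - 1) (count + 1)
            rfl (by omega) (by omega)]
          have hab : pvg l left < pvg l right := pvg_lt l hp h0 hlr hr
          have hGsplit : pvG l t left right = 1 + pvG l t (left + 1) (right - 1) := by
            unfold pvG
            rw [pvSeg_cons (lo := left) (hi := right) (le_of_lt hlr),
                pvSeg_snoc (lo := left + 1) (hi := right) (by omega)]
            rw [List.countP_cons, List.countP_append, List.countP_singleton]
            have hyes : pvP l t left right left = true := by
              rw [pvP_iff]
              constructor
              · exact pv_mem_map_seg.mpr ⟨right, le_of_lt hlr, le_refl _, by omega⟩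
              · omega
            have hnot : pvP l t left right right = false := by
              rw [Bool.eq_false_iff]
              intro hcon
              rcases pvP_iff.mp hcon with ⟨hmem, h2⟩
              rcases pv_mem_map_seg.mp hmem with ⟨j, hj1, hj2, hj3⟩
              have : pvg l left ≤ pvg l j := pvg_le l hp h0 hj1 (by omega)
              omega
            have hcongr : List.countP (pvP l t left right) (pvSeg (left + 1) (right - 1))
                = List.countP (pvP l t (left + 1) (right - 1)) (pvSeg (left + 1) (right - 1)) := by
              apply List.countP_congr
              intro i hi
              rcases pvSeg_mem.mp hi with ⟨hi1, hi2⟩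
              rw [pvP_iff, pvP_iff]
              rw [pvSeg_cons (lo := left) (hi := right) (le_of_lt hlr),
                  pvSeg_snoc (lo := left + 1) (hi := right) (by omega),
                  List.map_cons, List.map_append, List.mem_cons, List.mem_append]
              have hgl : pvg l left < pvg l i := pvg_lt l hp h0 (by omega) (by omega)
              have hgr : pvg l i < pvg l right := pvg_lt l hp (by omega) (by omega) hr
              constructor
              · rintro ⟨h1 | h1 | h1, h2⟩
                · omega
                · exact ⟨h1, h2⟩
                · simp only [List.map_cons, List.map_nil, List.mem_singleton] at h1
                  omega
              · rintro ⟨h1, h2⟩; exact ⟨Or.inr (Or.inl h1), h2⟩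
            rw [hcongr]
            simp only [hyes, hnot, Bool.false_eq_true, if_false, if_true, add_zero]
            push_cast
            ring
          rw [hGsplit]
          ring
    · rw [dif_neg hlr]
      have hG : pvG l t left right = 0 := by
        unfold pvG
        rcases lt_or_ge right left with h | h
        · rw [pvSeg_empty h]; simp
        · have hle : left = right := by omega
          subst hle
          rw [pvSeg_cons (lo := left) (hi := left) (le_refl _), pvSeg_empty (by omega)]
          have hno : pvP l t left left left = false := by
            rw [Bool.eq_false_iff]
            intro hcon
            rcases pvP_iff.mp hcon with ⟨hmem, h2⟩
            rcases pv_mem_map_seg.mp hmem with ⟨j, hj1, hj2, hj3⟩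
            have : j = left := by omega
            subst this
            omega
          simp [hno]
      rw [hG]; ring

-- the image of the full segment is the list itself
lemma pvSeg_map_full (l : List Int) : (pvSeg 0 ((l.length : Int) - 1)).map (pvg l) = l := by
  have hn : ((l.length : Int) - 1 + 1 - 0).toNat = l.length := by omega
  have hlen : ((pvSeg 0 ((l.length : Int) - 1)).map (pvg l)).length = l.length := by
    simp [pvSeg]
  apply List.ext_getElem hlen
  intro k h1 h2
  have hk : k < l.length := h2
  have hseg : (pvSeg 0 ((l.length : Int) - 1))[k]'(by simp [pvSeg]; omega) = (k : Int) := by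
    simp [pvSeg]
  rw [List.getElem_map, hseg]
  unfold pvg
  rw [PySem.List.pyGetD_eq_getElem l 0 (by omega) (by simpa using hk)]
  simp

-- ===== VERDICT (by name: the statement is the Claim_ definition above) =====
theorem merge_de_dupe_and_count_pairs_spec : Claim_equal_merge_de_dupe_and_count_pairs := by
  intro arr1 arr2 target _
  unfold Spec_merge_de_dupe_and_count_pairs merge_de_dupe_and_count_pairs merge_de_dupe_and_count_pairs_alt
  simp only
  set merged := PySem.List.sorted (PySem.Set.ofList (arr1 ++ arr2)) (fun x => x) false with hm
  have hp : merged.Pairwise (· < ·) := PySem.List.sorted_ofList_pairwise_lt (arr1 ++ arr2)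
  congr 1
  -- A's loop equals the segment count
  rw [pvLoop_eq merged target hp ((merged.length : Int) - 1 - 0).toNat 0 ((merged.length : Int) - 1) 0
    rfl (le_refl 0) (by omega)]
  rw [zero_add]
  -- B's fold equals countP over merged
  rw [PySem.List.foldl_ite_add_one]
  rw [zero_add]
  -- membership in set(merged) is membership in merged
  have hmemb : ∀ x : Int, x ∈ PySem.Set.ofList merged ↔ x ∈ merged := by
    intro x
    rw [← PySem.List.dedup_eq_ofList]
    exact PySem.List.mem_dedup merged x
  -- identify the two counts
  unfold pvG
  have hmap := pvSeg_map_full merged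
  have hc : List.countP (fun x => decide ((target - x) ∈ PySem.Set.ofList merged ∧ x < target - x)) merged
      = List.countP (pvP merged target 0 ((merged.length : Int) - 1))
          (pvSeg 0 ((merged.length : Int) - 1)) := by
    conv_lhs => rw [← hmap]
    rw [List.countP_map]
    apply List.countP_congr
    intro i _
    simp only [Function.comp_apply, decide_eq_true_eq, pvP_iff, hmap, hmemb]
  rw [hc]
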